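-- pv_equiv track=rewrite | github.com/FabianTinkl/AbletonMCP | mcp_server/handlers/samples.py | _determine_optimal_warp_mode
-- ===== SOURCE A (Python) =====
-- def _determine_optimal_warp_mode(sample_path: str) -> str:
--     """Determine optimal warp mode based on sample characteristics."""
--     path_lower = sample_path.lower()
--
--     if any(word in path_lower for word in ["drum", "perc", "beat", "kick", "snare"]):
--         return "beats"
--     elif any(word in path_lower for word in ["vocal", "voice", "sing"]):
--         return "complex"
--     elif any(word in path_lower for word in ["bass", "sub"]):
--         return "tones"
--     elif any(word in path_lower for word in ["pad", "ambient", "texture"]):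
--         return "texture"
--     elif any(word in path_lower for word in ["lead", "solo", "melody"]):
--         return "complex"
--     else:
--         return "beats"  # Default for rhythmic content
-- ===== SOURCE B (Python) =====
-- TABLE = [
--     ("drum", 0), ("perc", 0), ("beat", 0), ("kick", 0), ("snare", 0),
--     ("vocal", 1), ("voice", 1), ("sing", 1),
--     ("bass", 2), ("sub", 2),
--     ("pad", 3), ("ambient", 3), ("texture", 3),
--     ("lead", 4), ("solo", 4), ("melody", 4),
-- ]
-- MODES = ["beats", "complex", "tones", "texture", "complex"]
--
--
-- def _scan_min_priority(p):
--     """Single left-to-right scan: smallest priority of any keyword occurring in p."""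
--     best = None
--     for i in range(len(p)):
--         for kw, pri in TABLE:
--             if p.startswith(kw, i) and (best is None or pri < best):
--                 best = pri
--     return best
--
--
-- def _determine_optimal_warp_mode(sample_path: str) -> str:
--     """Determine optimal warp mode based on sample characteristics."""
--     best = _scan_min_priority(sample_path.lower())
--     return "beats" if best is None else MODES[best]
-- ===== Notes on version B (the rewrite author's own statement) =====
-- stated objective: alternative
-- what changed: Instead of five staged any-substring checks, B makes a single left-to-right scan of the lowered path, at each position recording the minimum priority of any keyword starting there, and finally maps the minimum matched priority to its mode (min-priority aggregation equals first-match precedence).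
import Mathlib
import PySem

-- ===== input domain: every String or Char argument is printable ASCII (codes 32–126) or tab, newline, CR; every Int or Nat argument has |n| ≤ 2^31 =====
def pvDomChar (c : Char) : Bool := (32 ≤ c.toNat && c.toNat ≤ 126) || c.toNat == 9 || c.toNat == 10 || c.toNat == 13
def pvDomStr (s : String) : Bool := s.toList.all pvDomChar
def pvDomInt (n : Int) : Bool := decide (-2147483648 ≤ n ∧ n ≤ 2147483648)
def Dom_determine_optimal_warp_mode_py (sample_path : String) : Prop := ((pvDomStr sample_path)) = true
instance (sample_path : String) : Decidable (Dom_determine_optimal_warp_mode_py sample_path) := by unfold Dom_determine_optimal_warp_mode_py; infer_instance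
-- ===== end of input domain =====

-- B replaces A's five staged any-substring checks with one left-to-right scan of the path that
-- keeps the minimum matched rule priority (alternative decomposition; same cost).

-- ===== PORT A =====
def determine_optimal_warp_mode_py (sample_path : String) : String :=
  -- path_lower = sample_path.lower(), inlined at each use
  if ["drum", "perc", "beat", "kick", "snare"].any (fun word => PySem.Str.isIn word (PySem.Str.lower sample_path)) then
    "beats"
  else if ["vocal", "voice", "sing"].any (fun word => PySem.Str.isIn word (PySem.Str.lower sample_path)) then
    "complex"
  else if ["bass", "sub"].any (fun word => PySem.Str.isIn word (PySem.Str.lower sample_path)) then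
    "tones"
  else if ["pad", "ambient", "texture"].any (fun word => PySem.Str.isIn word (PySem.Str.lower sample_path)) then
    "texture"
  else if ["lead", "solo", "melody"].any (fun word => PySem.Str.isIn word (PySem.Str.lower sample_path)) then
    "complex"
  else
    "beats"

-- ===== PORT B =====
def pvTable : List (String × Nat) :=
  [ ("drum", 0), ("perc", 0), ("beat", 0), ("kick", 0), ("snare", 0),
    ("vocal", 1), ("voice", 1), ("sing", 1),
    ("bass", 2), ("sub", 2),
    ("pad", 3), ("ambient", 3), ("texture", 3),
    ("lead", 4), ("solo", 4), ("melody", 4) ]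

def pvModes : List String := ["beats", "complex", "tones", "texture", "complex"]

-- _scan_min_priority: p.startswith(kw, i) with 0 ≤ i is exactly "kw is a prefix of p[i:]",
-- ported as isPrefixOf on drop i.
def pvScan (l : List Char) : Option Nat :=
  (List.range l.length).foldl
    (fun best i => pvTable.foldl
      (fun b kp =>
        if kp.1.toList.isPrefixOf (l.drop i) &&
           (match b with | none => true | some x => decide (kp.2 < x))
        then some kp.2 else b) best) none

def determine_optimal_warp_mode_py_alt (sample_path : String) : String :=
  match pvScan (PySem.Str.lower sample_path).toList with
  | none => "beats"
  | some pri => (PySem.List.pyGet? pvModes (Int.ofNat pri)).getD ""  -- MODES[best]; best is always 0–4, so in range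

-- ===== PRECONDITION & SPEC =====
def Spec_determine_optimal_warp_mode_py (sample_path : String) (out : String) : Prop := out = determine_optimal_warp_mode_py_alt sample_path
instance (sample_path : String) (out : String) : Decidable (Spec_determine_optimal_warp_mode_py sample_path out) := by unfold Spec_determine_optimal_warp_mode_py; infer_instance

-- ===== CLAIM =====
def Claim_equal_determine_optimal_warp_mode_py : Prop := ∀ (sample_path : String), Dom_determine_optimal_warp_mode_py sample_path → Spec_determine_optimal_warp_mode_py sample_path (determine_optimal_warp_mode_py sample_path)

-- ===== LEMMAS AND PROOFS =====

-- min with `none` as identity: the accumulator combine of B's scan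
def pvComb (b : Option Nat) (p : Nat) : Option Nat :=
  some (match b with | none => p | some x => min p x)

-- the multiset of priorities of all keyword occurrences that B's scan visits
def pvCand (l : List Char) : List Nat :=
  (List.range l.length).flatMap
    (fun i => pvTable.filterMap
      (fun kp => if kp.1.toList.isPrefixOf (l.drop i) then some kp.2 else none))

theorem pvInner (cond : String × Nat → Bool) (xs : List (String × Nat)) : ∀ (b : Option Nat),
    xs.foldl (fun b kp =>
      if cond kp && (match b with | none => true | some x => decide (kp.2 < x))
      then some kp.2 else b) b
    = (xs.filterMap (fun kp => if cond kp then some kp.2 else none)).foldl pvComb b := by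
  induction xs with
  | nil => intro b; rfl
  | cons a xs ih =>
      intro b
      simp only [List.foldl_cons, List.filterMap_cons]
      rcases Bool.eq_false_or_eq_true (cond a) with h | h <;> rw [h]
      · have hstep : (if (true && (match b with | none => true | some x => decide (a.2 < x))) = true
            then some a.2 else b) = pvComb b a.2 := by
          cases b with
          | none => rfl
          | some x =>
              simp only [Bool.true_and, decide_eq_true_eq, pvComb]
              have hmin : min a.2 x = if a.2 < x then a.2 else x := by
                rw [Nat.min_def]; split_ifs <;> omega
              rw [hmin]
              split_ifs <;> rfl
        rw [hstep]
        exact ih (pvComb b a.2)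
      · exact ih b

theorem pvFold_flatMap {α β γ : Type} (g : γ → β → γ) :
    ∀ (L : List α) (f : α → List β) (b : γ),
    L.foldl (fun b a => (f a).foldl g b) b = (L.flatMap f).foldl g b := by
  intro L
  induction L with
  | nil => intro f b; rfl
  | cons a L ih => intro f b; simp only [List.foldl_cons, List.flatMap_cons, List.foldl_append, ih]

theorem pvComb_some : ∀ (xs : List Nat) (x : Nat), xs.foldl pvComb (some x) = some (xs.foldl min x) := by
  intro xs
  induction xs with
  | nil => intro x; rfl
  | cons a xs ih =>
      intro x
      simp only [List.foldl_cons]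
      have : pvComb (some x) a = some (min x a) := by simp [pvComb, Nat.min_comm]
      rw [this, ih]

theorem pvComb_min? : ∀ (xs : List Nat), xs.foldl pvComb none = xs.min? := by
  intro xs
  cases xs with
  | nil => rfl
  | cons a xs =>
      have h0 : pvComb none a = some a := rfl
      simp only [List.foldl_cons, h0, pvComb_some, List.min?_cons']

theorem pvBest_eq (l : List Char) : pvScan l = (pvCand l).min? := by
  unfold pvScan
  rw [← pvComb_min?]
  unfold pvCand
  rw [← pvFold_flatMap]
  exact List.foldl_ext _ _ _ (fun b i _ => pvInner (fun kp => kp.1.toList.isPrefixOf (l.drop i)) pvTable b)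

theorem pvTable_nonempty : ∀ kp ∈ pvTable, kp.1.toList ≠ [] := by decide

theorem pvPos_iff (kw : String) (hkw : kw.toList ≠ []) (p : String) :
    (∃ i, i < p.toList.length ∧ kw.toList.isPrefixOf (p.toList.drop i) = true) ↔
      PySem.Str.isIn kw p = true := by
  rw [PySem.Str.isIn_eq, ← PySem.Chars.exists_prefix_drop_iff_isIn]
  constructor
  · rintro ⟨i, _, hp⟩
    exact ⟨i, List.isPrefixOf_iff_prefix.mp hp⟩
  · rintro ⟨j, hj⟩
    by_cases hjl : j < p.toList.length
    · exact ⟨j, hjl, List.isPrefixOf_iff_prefix.mpr hj⟩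
    · exfalso
      have hd : p.toList.drop j = [] := List.drop_eq_nil_of_le (Nat.le_of_not_lt hjl)
      rw [hd] at hj
      exact hkw (List.prefix_nil.mp hj)

theorem pvCand_mem (p : String) (r : Nat) :
    r ∈ pvCand p.toList ↔ ∃ kp ∈ pvTable, PySem.Str.isIn kp.1 p = true ∧ kp.2 = r := by
  unfold pvCand
  simp only [List.mem_flatMap, List.mem_range, List.mem_filterMap,
    Option.ite_none_right_eq_some, Option.some.injEq]
  constructor
  · rintro ⟨i, hi, kp, hkp, hpre, hr⟩
    exact ⟨kp, hkp, (pvPos_iff kp.1 (pvTable_nonempty kp hkp) p).mp ⟨i, hi, hpre⟩, hr⟩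
  · rintro ⟨kp, hkp, hin, hr⟩
    obtain ⟨i, hi, hpre⟩ := (pvPos_iff kp.1 (pvTable_nonempty kp hkp) p).mpr hin
    exact ⟨i, hi, kp, hkp, hpre, hr⟩

-- per-rule membership: priority r is a candidate iff some keyword of rule r occurs in p
theorem pvRule0 (p : String) : (0:Nat) ∈ pvCand p.toList ↔ (["drum", "perc", "beat", "kick", "snare"].any (fun word => PySem.Str.isIn word p)) = true := by
  rw [pvCand_mem]; simp [pvTable]

theorem pvRule1 (p : String) : (1:Nat) ∈ pvCand p.toList ↔ (["vocal", "voice", "sing"].any (fun word => PySem.Str.isIn word p)) = true := by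
  rw [pvCand_mem]; simp [pvTable]

theorem pvRule2 (p : String) : (2:Nat) ∈ pvCand p.toList ↔ (["bass", "sub"].any (fun word => PySem.Str.isIn word p)) = true := by
  rw [pvCand_mem]; simp [pvTable]

theorem pvRule3 (p : String) : (3:Nat) ∈ pvCand p.toList ↔ (["pad", "ambient", "texture"].any (fun word => PySem.Str.isIn word p)) = true := by
  rw [pvCand_mem]; simp [pvTable]

theorem pvRule4 (p : String) : (4:Nat) ∈ pvCand p.toList ↔ (["lead", "solo", "melody"].any (fun word => PySem.Str.isIn word p)) = true := by
  rw [pvCand_mem]; simp [pvTable]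

theorem pvValues (p : String) : ∀ r ∈ pvCand p.toList, r = 0 ∨ r = 1 ∨ r = 2 ∨ r = 3 ∨ r = 4 := by
  intro r hr
  rw [pvCand_mem] at hr
  simp [pvTable] at hr
  rcases hr with ⟨-,rfl⟩|⟨-,rfl⟩|⟨-,rfl⟩|⟨-,rfl⟩|⟨-,rfl⟩|⟨-,rfl⟩|⟨-,rfl⟩|⟨-,rfl⟩|⟨-,rfl⟩|⟨-,rfl⟩|⟨-,rfl⟩|⟨-,rfl⟩|⟨-,rfl⟩|⟨-,rfl⟩|⟨-,rfl⟩|⟨-,rfl⟩ <;> omega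

-- ===== VERDICT =====
theorem determine_optimal_warp_mode_py_spec : Claim_equal_determine_optimal_warp_mode_py := by
  intro s _
  unfold Spec_determine_optimal_warp_mode_py determine_optimal_warp_mode_py determine_optimal_warp_mode_py_alt
  rw [pvBest_eq]
  set p := PySem.Str.lower s with hp
  by_cases h0 : (["drum", "perc", "beat", "kick", "snare"].any (fun word => PySem.Str.isIn word p)) = true
  · have hm : (pvCand p.toList).min? = some 0 := by
      rw [List.min?_eq_some_iff]
      exact ⟨(pvRule0 p).mpr h0, fun b _ => Nat.zero_le b⟩
    rw [if_pos h0, hm]; rfl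
  · by_cases h1 : (["vocal", "voice", "sing"].any (fun word => PySem.Str.isIn word p)) = true
    · have hm : (pvCand p.toList).min? = some 1 := by
        rw [List.min?_eq_some_iff]
        refine ⟨(pvRule1 p).mpr h1, fun b hb => ?_⟩
        rcases pvValues p b hb with rfl|rfl|rfl|rfl|rfl
        · exact absurd ((pvRule0 p).mp hb) h0
        all_goals omega
      rw [if_neg h0, if_pos h1, hm]; rfl
    · by_cases h2 : (["bass", "sub"].any (fun word => PySem.Str.isIn word p)) = true
      · have hm : (pvCand p.toList).min? = some 2 := by
          rw [List.min?_eq_some_iff]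
          refine ⟨(pvRule2 p).mpr h2, fun b hb => ?_⟩
          rcases pvValues p b hb with rfl|rfl|rfl|rfl|rfl
          · exact absurd ((pvRule0 p).mp hb) h0
          · exact absurd ((pvRule1 p).mp hb) h1
          all_goals omega
        rw [if_neg h0, if_neg h1, if_pos h2, hm]; rfl
      · by_cases h3 : (["pad", "ambient", "texture"].any (fun word => PySem.Str.isIn word p)) = true
        · have hm : (pvCand p.toList).min? = some 3 := by
            rw [List.min?_eq_some_iff]
            refine ⟨(pvRule3 p).mpr h3, fun b hb => ?_⟩
            rcases pvValues p b hb with rfl|rfl|rfl|rfl|rfl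
            · exact absurd ((pvRule0 p).mp hb) h0
            · exact absurd ((pvRule1 p).mp hb) h1
            · exact absurd ((pvRule2 p).mp hb) h2
            all_goals omega
          rw [if_neg h0, if_neg h1, if_neg h2, if_pos h3, hm]; rfl
        · by_cases h4 : (["lead", "solo", "melody"].any (fun word => PySem.Str.isIn word p)) = true
          · have hm : (pvCand p.toList).min? = some 4 := by
              rw [List.min?_eq_some_iff]
              refine ⟨(pvRule4 p).mpr h4, fun b hb => ?_⟩
              rcases pvValues p b hb with rfl|rfl|rfl|rfl|rfl
              · exact absurd ((pvRule0 p).mp hb) h0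
              · exact absurd ((pvRule1 p).mp hb) h1
              · exact absurd ((pvRule2 p).mp hb) h2
              · exact absurd ((pvRule3 p).mp hb) h3
              · omega
            rw [if_neg h0, if_neg h1, if_neg h2, if_neg h3, if_pos h4, hm]; rfl
          · have hm : (pvCand p.toList).min? = none := by
              rw [List.min?_eq_none_iff, List.eq_nil_iff_forall_not_mem]
              intro r hr
              rcases pvValues p r hr with rfl|rfl|rfl|rfl|rfl
              · exact absurd ((pvRule0 p).mp hr) h0
              · exact absurd ((pvRule1 p).mp hr) h1
              · exact absurd ((pvRule2 p).mp hr) h2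
              · exact absurd ((pvRule3 p).mp hr) h3
              · exact absurd ((pvRule4 p).mp hr) h4
            rw [if_neg h0, if_neg h1, if_neg h2, if_neg h3, if_neg h4, hm]
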